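-- pv_equiv track=rewrite | github.com/DmitryBogomolov/training-plan-parser | text_parser.py | split_to_parts
-- ===== SOURCE A (Python) =====
-- def split_to_parts(lines):
--     anchors = []
--     is_data = True
--     for i in range(len(lines)):
--         if bool(lines[i]) == is_data:
--             anchors.append(i)
--             is_data = not is_data
--     if len(anchors) % 2 == 1:
--         anchors.append(len(lines))
--     parts = []
--     for i in range(0, len(anchors), 2):
--         start, end = anchors[i], anchors[i + 1]
--         parts.append(lines[start:end])
--     return parts
-- ===== SOURCE B (Python) =====
-- def split_to_parts(lines):
--     parts = []
--     current = []
--     for line in lines: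
--         if line:
--             current.append(line)
--         else:
--             if current:
--                 parts.append(current)
--                 current = []
--     if current:
--         parts.append(current)
--     return parts
-- ===== Notes on version B (the rewrite author's own statement) =====
-- stated objective: simpler
-- what changed: Replaces the two-pass anchor-index table plus slicing with a single-pass grouping loop that accumulates the current block and flushes it on blank lines and at EOF.
import Mathlib
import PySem

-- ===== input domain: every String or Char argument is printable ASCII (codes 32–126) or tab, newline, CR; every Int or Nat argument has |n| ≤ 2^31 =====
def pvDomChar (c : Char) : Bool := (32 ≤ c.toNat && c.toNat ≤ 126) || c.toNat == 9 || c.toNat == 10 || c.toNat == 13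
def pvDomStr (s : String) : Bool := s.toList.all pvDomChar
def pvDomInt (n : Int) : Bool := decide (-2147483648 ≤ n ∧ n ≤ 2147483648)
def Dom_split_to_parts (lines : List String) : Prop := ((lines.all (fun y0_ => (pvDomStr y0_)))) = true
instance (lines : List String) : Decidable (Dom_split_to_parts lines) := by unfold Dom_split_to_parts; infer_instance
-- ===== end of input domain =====

-- B replaces A's two-pass anchor-index table + slicing with one single-pass grouping loop (same O(n) cost, simpler).


-- ===== PORT A =====
def split_to_parts (lines : List String) : List (List String) :=
  let st :=
    (PySem.List.pyRange 0 (PySem.List.len lines) 1).foldl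
      (fun (s : List Int × Bool) i =>
        if ((PySem.List.pyGetD lines i "") != "") == s.2 then (s.1 ++ [i], !s.2) else s)
      ([], true)
  let anchors :=
    if PySem.Int.mod (PySem.List.len st.1) 2 == 1 then st.1 ++ [PySem.List.len lines] else st.1
  (PySem.List.pyRange 0 (PySem.List.len anchors) 2).foldl
    (fun parts i =>
      parts ++ [PySem.List.slice lines (some (PySem.List.pyGetD anchors i 0))
                                       (some (PySem.List.pyGetD anchors (i + 1) 0))])
    []

-- ===== PORT B =====
-- loop body of B: append a truthy line to `current`, flush `current` into `parts` on a falsy line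
def stepB (s : List (List String) × List String) (line : String) : List (List String) × List String :=
  if line != "" then (s.1, s.2 ++ [line])
  else if s.2 != [] then (s.1 ++ [s.2], ([] : List String)) else s

-- final flush of a pending non-empty `current`
def finishB (st : List (List String) × List String) : List (List String) :=
  if st.2 != [] then st.1 ++ [st.2] else st.1

def split_to_parts_alt (lines : List String) : List (List String) :=
  finishB (lines.foldl stepB ([], []))

-- ===== PRECONDITION & SPEC =====
def Spec_split_to_parts (lines : List String) (out : List (List String)) : Prop := out = split_to_parts_alt lines
instance (lines : List String) (out : List (List String)) : Decidable (Spec_split_to_parts lines out) := by unfold Spec_split_to_parts; infer_instance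

-- ===== CLAIM (what is proved, stated in full; the proofs are below) =====
def Claim_equal_split_to_parts : Prop := ∀ (lines : List String), Dom_split_to_parts lines → Spec_split_to_parts lines (split_to_parts lines)

-- ===== LEMMAS AND PROOFS =====

-- anchor positions of A's first loop, relative form (Nat indices)
def anch : List String → Bool → List Nat
  | [], _ => []
  | x :: xs, d =>
    if (x != "") == d then 0 :: (anch xs (!d)).map (· + 1)
    else (anch xs d).map (· + 1)

-- final parity flag of A's first loop
def endPar : List String → Bool → Bool
  | [], d => d
  | x :: xs, d => if (x != "") == d then endPar xs (!d) else endPar xs d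

-- consecutive pairing of the anchor list
def pairs : List Nat → List (Nat × Nat)
  | a :: b :: t => (a, b) :: pairs t
  | _ => []

-- completed anchor list: append len(lines) when the count is odd
def anch2 (lines : List String) : List Nat :=
  anch lines true ++ (if (anch lines true).length % 2 = 1 then [lines.length] else [])

-- direct recursive computation of the (start, end) pairs
def pA : List String → Bool → Nat → Nat → List (Nat × Nat)
  | [], d, i, s => if d then [] else [(s, i)]
  | x :: xs, d, i, s =>
    if d then (if x != "" then pA xs false (i+1) i else pA xs true (i+1) s)
    else (if x != "" then pA xs false (i+1) s else (s, i) :: pA xs true (i+1) 0)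

def seg (L : List String) (p : Nat × Nat) : List String := (L.drop p.1).take (p.2 - p.1)

-- B's canonical recursion: accumulate current block, flush on blanks and at the end
def groupsAux : List String → List String → List (List String)
  | cur, [] => if cur != [] then [cur] else []
  | cur, x :: xs =>
    if x != "" then groupsAux (cur ++ [x]) xs
    else if cur != [] then cur :: groupsAux [] xs else groupsAux cur xs

lemma fold1_general (xs : List String) : ∀ (pre : List String) (d : Bool) (acc : List Int),
    ((List.range xs.length).map (fun j => ((pre.length + j : Nat) : Int))).foldl
      (fun (s : List Int × Bool) i =>
        if ((PySem.List.pyGetD (pre ++ xs) i "") != "") == s.2 then (s.1 ++ [i], !s.2) else s)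
      (acc, d)
    = (acc ++ (anch xs d).map (fun a => ((pre.length + a : Nat) : Int)), endPar xs d) := by
  induction xs with
  | nil => intro pre d acc; simp [anch, endPar]
  | cons x xs ih =>
    intro pre d acc
    rw [show pre ++ x :: xs = (pre ++ [x]) ++ xs by simp]
    have hget : PySem.List.pyGetD ((pre ++ [x]) ++ xs) (((pre.length : Nat)) : Int) "" = x := by
      rw [PySem.List.pyGetD_natCast, List.append_assoc,
        List.getD_append_right pre ([x] ++ xs) "" pre.length (le_refl _)]
      simp
    rw [show (x :: xs).length = xs.length + 1 from rfl, List.range_succ_eq_map]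
    simp only [List.map_cons, List.map_map, List.foldl_cons, Function.comp_def,
      Nat.succ_eq_add_one, Nat.add_zero]
    rw [hget]
    have hmap : ((List.range xs.length).map fun j => ((pre.length + (j+1) : Nat) : Int))
        = ((List.range xs.length).map fun j => (((pre ++ [x]).length + j : Nat) : Int)) := by
      refine List.map_congr_left fun j _ => ?_
      have : pre.length + (j+1) = (pre ++ [x]).length + j := by simp; omega
      rw [this]
    cases hcond : ((x != "") == d)
    · simp only [Bool.false_eq_true, if_false]
      rw [hmap, ih]
      simp [anch, endPar, hcond, List.map_map, Function.comp_def]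
      intro a _
      omega
    · simp only [if_true]
      rw [hmap, ih]
      simp [anch, endPar, hcond, List.map_map, Function.comp_def]
      intro a _
      omega

lemma pA_anch (xs : List String) : ∀ (d : Bool) (i s : Nat),
    pA xs d i s =
      pairs ((if d then [] else [s]) ++ (anch xs d).map (· + i) ++
        (if ((anch xs d).length + (if d then 0 else 1)) % 2 = 1 then [i + xs.length] else [])) := by
  induction xs with
  | nil => intro d i s; cases d <;> simp [pA, anch, pairs]
  | cons x xs ih =>
    intro d i s
    by_cases hx : x = "" <;> cases d <;>
      simp [pA, anch, hx, ih, pairs, List.map_map, Function.comp_def, Nat.add_mod_right,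
        Nat.add_comm, Nat.add_left_comm]

lemma pairs_getD (f : Nat → Nat → List String) :
    ∀ (ns : List Nat) (m : Nat), ns.length = 2 * m →
    (List.range m).map (fun k => f (ns.getD (2*k) 0) (ns.getD (2*k+1) 0)) =
      (pairs ns).map (fun p => f p.1 p.2) := by
  intro ns
  induction ns using pairs.induct with
  | case1 a b t ih =>
    intro m hm
    match m, hm with
    | m+1, hm =>
      have ht : t.length = 2*m := by simp at hm; omega
      rw [List.range_succ_eq_map, show pairs (a::b::t) = (a,b) :: pairs t from rfl]
      simp only [List.map_cons, List.map_map]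
      refine congrArg₂ _ ?_ ?_
      · norm_num
      · rw [← ih m ht]
        refine List.map_congr_left ?_
        intro k _
        simp only [Function.comp_def, Nat.succ_eq_add_one]
        rw [show 2*(k+1) = (2*k)+1+1 from by ring]
        simp only [List.getD_cons_succ]
  | case2 t h =>
    intro m hm
    cases t with
    | nil =>
      have : m = 0 := by simp at hm; omega
      simp [this, pairs]
    | cons a t' =>
      cases t' with
      | nil => simp at hm; omega
      | cons b t'' => exact absurd rfl (fun hh => h a b t'' hh)

lemma pa_groups (xs : List String) :
    (∀ pre : List String, (pA xs true pre.length 0).map (seg (pre ++ xs)) = groupsAux [] xs) ∧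
    (∀ (pre0 cur : List String), cur ≠ [] →
      (pA xs false (pre0.length + cur.length) pre0.length).map (seg (pre0 ++ (cur ++ xs))) =
        groupsAux cur xs) := by
  induction xs with
  | nil =>
    refine ⟨fun pre => by simp [pA, groupsAux], ?_⟩
    intro pre0 cur hc
    simp [pA, groupsAux, seg, hc]
  | cons x xs ih =>
    obtain ⟨ihT, ihF⟩ := ih
    refine ⟨?_, ?_⟩
    · intro pre
      by_cases hx : x = ""
      · subst hx
        have h := ihT (pre ++ [""])
        simp only [List.length_append, List.length_cons, List.length_nil, Nat.zero_add,
          List.append_assoc, List.singleton_append] at h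
        simpa [pA, groupsAux] using h
      · have h := ihF pre [x] (by simp)
        simp only [List.length_cons, List.length_nil, Nat.zero_add,
          List.singleton_append] at h
        simpa [pA, groupsAux, hx] using h
    · intro pre0 cur hc
      by_cases hx : x = ""
      · subst hx
        have h := ihT (pre0 ++ cur ++ [""])
        simp only [List.length_append, List.length_cons, List.length_nil, Nat.zero_add,
          List.append_assoc, List.singleton_append] at h
        have hhead : seg (pre0 ++ (cur ++ "" :: xs)) (pre0.length, pre0.length + cur.length)
            = cur := by
          simp [seg]
        simp only [pA, groupsAux, bne_self_eq_false, Bool.false_eq_true, if_false,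
          List.map_cons]
        rw [hhead]
        simp only [Nat.add_assoc] at h ⊢
        rw [h]
        simp [hc]
      · have h := ihF pre0 (cur ++ [x]) (by simp)
        simp only [List.length_append, List.length_cons, List.length_nil, Nat.zero_add,
          List.append_assoc, List.singleton_append] at h
        simpa [pA, groupsAux, hx, Nat.add_assoc] using h

lemma getD_map_int (l : List Nat) (n : Nat) :
    (l.map (fun a : Nat => (a:Int))).getD n 0 = ((l.getD n 0 : Nat) : Int) := by
  simp only [List.getD, List.getElem?_map]
  cases l[n]? <;> simp

lemma anch2_even (lines : List String) : (anch2 lines).length % 2 = 0 := by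
  unfold anch2
  by_cases hodd : (anch lines true).length % 2 = 1 <;> simp [hodd] <;> omega

lemma fold1_top (lines : List String) :
    (PySem.List.pyRange 0 (PySem.List.len lines) 1).foldl
      (fun (s : List Int × Bool) i =>
        if ((PySem.List.pyGetD lines i "") != "") == s.2 then (s.1 ++ [i], !s.2) else s)
      ([], true)
    = ((anch lines true).map (fun a : Nat => (a : Int)), endPar lines true) := by
  rw [PySem.List.len_eq, PySem.List.pyRange_zero_natCast]
  have h := fold1_general lines [] true []
  simp only [List.length_nil, Nat.zero_add] at h
  exact h

lemma A_eq_pairs (lines : List String) :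
    split_to_parts lines = (pairs (anch2 lines)).map (seg lines) := by
  unfold split_to_parts
  rw [fold1_top]
  dsimp only
  have hif : (if PySem.Int.mod (PySem.List.len ((anch lines true).map (fun a : Nat => (a:Int)))) 2 == 1
        then (anch lines true).map (fun a : Nat => (a:Int)) ++ [PySem.List.len lines]
        else (anch lines true).map (fun a : Nat => (a:Int)))
      = (anch2 lines).map (fun a : Nat => (a:Int)) := by
    simp only [PySem.List.len_eq, List.length_map]
    by_cases hodd : (anch lines true).length % 2 = 1
    · simp [anch2, hodd]
      omega
    · have h0 : (anch lines true).length % 2 = 0 := by omega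
      simp [anch2, h0]
      omega
  rw [hif]
  obtain ⟨m, hm⟩ : ∃ m, (anch2 lines).length = 2*m := ⟨(anch2 lines).length / 2,
    by have := anch2_even lines; omega⟩
  rw [PySem.List.len_eq, List.length_map, hm,
    PySem.List.pyRange_of_pos 0 ((2*m : Nat) : Int) (by norm_num)]
  have hcnt : (if (0:Int) < ((2*m:Nat):Int) then ((((2*m:Nat):Int) - 0 + 2 - 1)/2).toNat else 0) = m := by
    by_cases hm0 : m = 0
    · simp [hm0]
    · rw [if_pos (by push_cast; omega)]
      push_cast
      omega
  rw [hcnt, PySem.List.foldl_append_singleton_eq_map, List.nil_append, List.map_map]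
  have hstep : ∀ k, k ∈ List.range m →
      (((fun i => PySem.List.slice lines
          (some (PySem.List.pyGetD ((anch2 lines).map (fun a : Nat => (a:Int))) i 0))
          (some (PySem.List.pyGetD ((anch2 lines).map (fun a : Nat => (a:Int))) (i + 1) 0)))
        ∘ (fun k : Nat => (0 : Int) + 2 * (k:Int))) k)
      = List.take ((anch2 lines).getD (2*k+1) 0 - (anch2 lines).getD (2*k) 0)
          (List.drop ((anch2 lines).getD (2*k) 0) lines) := by
    intro k _
    simp only [Function.comp_def]
    rw [show (0:Int) + 2 * (k:Int) = ((2*k : Nat) : Int) by push_cast; ring]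
    rw [show ((2*k : Nat) : Int) + 1 = ((2*k+1 : Nat) : Int) by push_cast; ring]
    rw [PySem.List.pyGetD_natCast, PySem.List.pyGetD_natCast, getD_map_int, getD_map_int,
      PySem.List.slice_natCast]
  rw [List.map_congr_left hstep,
    pairs_getD (fun a b => List.take (b - a) (List.drop a lines)) (anch2 lines) m hm]
  simp [seg]

lemma pairs_anch2 (lines : List String) : pairs (anch2 lines) = pA lines true 0 0 := by
  rw [pA_anch]
  simp [anch2]

lemma B_inv (xs : List String) : ∀ (parts : List (List String)) (cur : List String),
    finishB (xs.foldl stepB (parts, cur)) = parts ++ groupsAux cur xs := by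
  induction xs with
  | nil =>
    intro parts cur
    by_cases hc : cur = [] <;> simp [groupsAux, finishB, hc]
  | cons x xs ih =>
    intro parts cur
    rw [List.foldl_cons]
    by_cases hx : x = ""
    · by_cases hc : cur = []
      · rw [show stepB (parts, cur) x = (parts, cur) by simp [stepB, hx, hc], ih]
        simp [groupsAux, hx, hc]
      · rw [show stepB (parts, cur) x = (parts ++ [cur], []) by simp [stepB, hx, hc], ih]
        simp [groupsAux, hx, hc]
    · rw [show stepB (parts, cur) x = (parts, cur ++ [x]) by simp [stepB, hx], ih]
      simp [groupsAux, hx]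

lemma B_eq_groups (lines : List String) : split_to_parts_alt lines = groupsAux [] lines := by
  simpa [split_to_parts_alt] using B_inv lines [] []

-- ===== VERDICT (by name: the statement is the Claim_ definition above) =====
theorem split_to_parts_spec : Claim_equal_split_to_parts := by
  intro lines _
  show split_to_parts lines = split_to_parts_alt lines
  rw [A_eq_pairs, pairs_anch2, B_eq_groups]
  simpa using (pa_groups lines).1 []
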